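-- pv_equiv track=rewrite | github.com/JakubKazimierski/PythonPortfolio | Coderbyte_algorithms/Medium/CharacterRemoval/CharacterRemoval.py | CharacterRemoval
-- ===== SOURCE A (Python) =====
-- from itertools import combinations
--
-- def CharacterRemoval(strArr):
--     '''
--     Have the function CharacterRemoval(strArr)
--     read the array of strings stored in strArr,
--     which will contain 2 elements: the first element
--     will be a sequence of characters representing a word,
--     and the second element will be a long string of comma-separated
--     words, in alphabetical order, that represents a dictionary of
--     some arbitrary length.
--
--     For example: strArr can be:
--     ["worlcde", "apple,bat,cat,goodbye,hello,yellow,why,world"]. Your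
--     goal is to determine the minimum number of characters, if any,
--     can be removed from the word so that it matches one of the words from
--     the dictionary. In this case, your program should return 2 because once
--     you remove the characters "c" and "e" you are left with "world" and
--     that exists within the dictionary. If the word cannot be found no matter
--     what characters are removed, return -1.
--     '''
--
--     list_of_chars = list(strArr[0])
--
--     possible_words = [combinations(list_of_chars, lenght) for lenght in range(1, len(list_of_chars)+1)]
--
--     lenght_max = 0
--     for words in possible_words:
--         for word in words:
--             possible_out_word = "".join(word)
--             if possible_out_word in strArr[1].split(","):
--                 if len(possible_out_word) > lenght_max:
--                     lenght_max = len(possible_out_word)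
--
--     if lenght_max > 0:
--         return len(strArr[0]) - lenght_max
--
--     return -1
-- ===== SOURCE B (Python) =====
-- def CharacterRemoval(strArr):
--     word = strArr[0]
--     dictionary = strArr[1]
--
--     def is_subseq(w, s):
--         it = iter(s)
--         return all(c in it for c in w)
--
--     best = 0
--     for w in dictionary.split(","):
--         if len(w) > best and is_subseq(w, word):
--             best = len(w)
--     return len(word) - best if best else -1
-- ===== Notes on version B (the rewrite author's own statement) =====
-- stated objective: alternative
-- what changed: A enumerates every character combination of the word (all 2^n subsequences) and tests each against the dictionary; B instead scans each dictionary word once with a greedy subsequence test and keeps the longest match.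
-- outside the precondition, e.g. on CharacterRemoval(['']): A returns -1, B raises IndexError
import Mathlib
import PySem

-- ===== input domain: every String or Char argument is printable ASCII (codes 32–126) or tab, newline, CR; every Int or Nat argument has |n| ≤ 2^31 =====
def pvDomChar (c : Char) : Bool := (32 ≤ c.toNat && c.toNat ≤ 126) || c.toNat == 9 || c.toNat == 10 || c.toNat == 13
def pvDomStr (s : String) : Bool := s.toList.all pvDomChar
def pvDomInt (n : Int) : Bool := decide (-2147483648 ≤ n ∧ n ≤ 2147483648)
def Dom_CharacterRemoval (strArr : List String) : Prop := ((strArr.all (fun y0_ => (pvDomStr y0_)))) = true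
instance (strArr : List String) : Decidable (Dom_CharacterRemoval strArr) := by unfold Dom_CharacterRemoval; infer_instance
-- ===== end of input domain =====

-- B is a different algorithm: instead of enumerating all 2^n character combinations of the word
-- (as A does), it tests each dictionary word once for being a subsequence of the word (greedy scan).
-- Equivalence of the RETURN value is proved on lists with at least two elements (Pre_).

-- ===== PORT A =====
-- itertools.combinations(l, k) on a list of chars, in itertools' order (lexicographic by index)
def pvCombos : List Char → Nat → List (List Char)
  | _, 0 => [[]]
  | [], _ + 1 => []
  | c :: cs, k + 1 => (pvCombos cs k).map (fun w => c :: w) ++ pvCombos cs (k + 1)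

def CharacterRemoval (strArr : List String) : Int :=
  let listOfChars := ((PySem.List.pyGet? strArr 0).getD "").toList
  let possibleWords := (PySem.List.pyRange 1 (listOfChars.length + 1) 1).map
      (fun k => pvCombos listOfChars k.toNat)
  let lenghtMax : Nat := possibleWords.foldl (fun acc words =>
    words.foldl (fun acc word =>
      let possibleOutWord := String.ofList word
      if (((PySem.Str.split? ((PySem.List.pyGet? strArr 1).getD "") ",").getD [])).contains possibleOutWord then
        (if possibleOutWord.toList.length > acc then possibleOutWord.toList.length else acc)
      else acc) acc) 0
  if lenghtMax > 0 then (listOfChars.length : Int) - (lenghtMax : Int) else -1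

-- ===== PORT B =====
-- Source B's is_subseq: greedy consumption of the word (`c in it` over a shared iterator)
def pvIsSubseq : List Char → List Char → Bool
  | [], _ => true
  | _ :: _, [] => false
  | c :: cs, s :: ss => if c == s then pvIsSubseq cs ss else pvIsSubseq (c :: cs) ss

def CharacterRemoval_alt (strArr : List String) : Int :=
  let word := (PySem.List.pyGet? strArr 0).getD ""
  let dictionary := (PySem.List.pyGet? strArr 1).getD ""
  let best : Nat := (((PySem.Str.split? dictionary ",").getD [])).foldl (fun best w =>
    if w.toList.length > best && pvIsSubseq w.toList word.toList then w.toList.length else best) 0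
  if best ≠ 0 then (word.toList.length : Int) - (best : Int) else -1

-- ===== PRECONDITION & SPEC =====
-- Pre_ excludes lists of fewer than two strings: Python A raises IndexError there, except on a
-- one-element list with an empty word, where A accidentally returns -1 without ever reading the
-- missing dictionary (no combination is generated, so strArr[1] is never evaluated); B reads both
-- elements up front and naturally raises there.
def Pre_CharacterRemoval (strArr : List String) : Prop := 2 ≤ strArr.length
instance (strArr : List String) : Decidable (Pre_CharacterRemoval strArr) := by
  unfold Pre_CharacterRemoval; infer_instance
def pvWitness_CharacterRemoval : List String := ["worlcde", "apple,bat,cat,goodbye,hello,yellow,why,world"]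
def Spec_CharacterRemoval (strArr : List String) (out : Int) : Prop := out = CharacterRemoval_alt strArr
instance (strArr : List String) (out : Int) : Decidable (Spec_CharacterRemoval strArr out) := by
  unfold Spec_CharacterRemoval; infer_instance

-- ===== CLAIM (what is proved, stated in full; the proofs are below) =====
def Claim_equal_CharacterRemoval : Prop := ∀ (strArr : List String), Dom_CharacterRemoval strArr → Pre_CharacterRemoval strArr → Spec_CharacterRemoval strArr (CharacterRemoval strArr)

-- ===== LEMMAS AND PROOFS =====

theorem mem_pvCombos : ∀ (xs : List Char) (k : Nat) (w : List Char),
    w ∈ pvCombos xs k ↔ w.Sublist xs ∧ w.length = k := by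
  intro xs
  induction xs with
  | nil =>
    intro k w
    cases k with
    | zero => simp [pvCombos, List.length_eq_zero_iff]
    | succ k =>
      simp only [pvCombos, List.not_mem_nil, false_iff, not_and]
      intro hs
      simp [List.sublist_nil.mp hs]
  | cons c cs ih =>
    intro k w
    cases k with
    | zero =>
      simp only [pvCombos, List.mem_singleton, List.length_eq_zero_iff]
      constructor
      · rintro rfl; exact ⟨List.nil_sublist _, rfl⟩
      · exact fun h => h.2
    | succ k =>
      simp only [pvCombos, List.mem_append, List.mem_map, ih]
      constructor
      · rintro (⟨u, ⟨hsub, hlen⟩, rfl⟩ | ⟨hsub, hlen⟩)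
        · exact ⟨List.cons_sublist_cons.mpr hsub, by simp [hlen]⟩
        · exact ⟨hsub.trans (List.sublist_cons_self c cs), hlen⟩
      · rintro ⟨hsub, hlen⟩
        rcases List.sublist_cons_iff.mp hsub with h | ⟨r, rfl, hr⟩
        · exact Or.inr ⟨h, hlen⟩
        · exact Or.inl ⟨r, ⟨hr, by simpa using hlen⟩, rfl⟩

theorem pvIsSubseq_iff : ∀ (s w : List Char), pvIsSubseq w s = true ↔ w.Sublist s := by
  intro s
  induction s with
  | nil =>
    intro w
    cases w with
    | nil => simp [pvIsSubseq]
    | cons c cs => simp [pvIsSubseq]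
  | cons x xs ih =>
    intro w
    cases w with
    | nil => simp [pvIsSubseq, List.nil_sublist]
    | cons c cs =>
      by_cases h : c = x
      · subst h
        simp [pvIsSubseq, ih, List.cons_sublist_cons]
      · have hb : (c == x) = false := by simp [h]
        have hred : pvIsSubseq (c :: cs) (x :: xs) = pvIsSubseq (c :: cs) xs := by
          simp [pvIsSubseq, hb]
        rw [hred, ih]
        constructor
        · intro hs; exact hs.trans (List.sublist_cons_self x xs)
        · intro hs
          rcases List.sublist_cons_iff.mp hs with h' | ⟨r, he, _⟩
          · exact h'
          · injection he with h1 _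
            exact absurd h1 h

theorem foldl_ext {α β : Type} (f g : β → α → β) (l : List α) (h : ∀ acc x, f acc x = g acc x) :
    ∀ (b : β), l.foldl f b = l.foldl g b := by
  induction l with
  | nil => intro b; rfl
  | cons x xs ih => intro b; simp only [List.foldl_cons, h]; exact ih _

theorem nested_foldl {α β : Type} (g : β → List α) (step : Nat → α → Nat) (ks : List β) :
    ∀ (b : Nat), (ks.map g).foldl (fun acc ws => ws.foldl step acc) b = (ks.flatMap g).foldl step b := by
  induction ks with
  | nil => intro b; rfl
  | cons k ks ih =>
    intro b
    simp only [List.map_cons, List.foldl_cons, List.flatMap_cons, List.foldl_append]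
    exact ih _

theorem le_fmax_self {α : Type} (f : α → Nat) : ∀ (l : List α) (b : Nat),
    b ≤ l.foldl (fun a x => max a (f x)) b := by
  intro l
  induction l with
  | nil => intro b; simp
  | cons x xs ih => intro b; exact le_trans (Nat.le_max_left _ _) (ih _)

theorem le_fmax_of_mem {α : Type} (f : α → Nat) : ∀ (l : List α) (b : Nat) (x : α),
    x ∈ l → f x ≤ l.foldl (fun a y => max a (f y)) b := by
  intro l
  induction l with
  | nil => intro b x hx; simp at hx
  | cons y ys ih =>
    intro b x hx
    rcases List.mem_cons.mp hx with rfl | h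
    · exact le_trans (Nat.le_max_right _ _) (le_fmax_self f ys _)
    · exact ih _ _ h

theorem fmax_le {α : Type} (f : α → Nat) : ∀ (l : List α) (b c : Nat),
    b ≤ c → (∀ x ∈ l, f x ≤ c) → l.foldl (fun a x => max a (f x)) b ≤ c := by
  intro l
  induction l with
  | nil => intro b c hb _; simpa using hb
  | cons x xs ih =>
    intro b c hb hl
    exact ih _ _ (Nat.max_le.mpr ⟨hb, hl x List.mem_cons_self⟩)
      (fun y hy => hl y (List.mem_cons_of_mem _ hy))

theorem fmax_eq {α β : Type} (f : α → Nat) (g : β → Nat) (l : List α) (m : List β)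
    (h1 : ∀ x ∈ l, f x ≤ m.foldl (fun a y => max a (g y)) 0)
    (h2 : ∀ y ∈ m, g y ≤ l.foldl (fun a x => max a (f x)) 0) :
    l.foldl (fun a x => max a (f x)) 0 = m.foldl (fun a y => max a (g y)) 0 :=
  Nat.le_antisymm (fmax_le f l 0 _ (Nat.zero_le _) h1) (fmax_le g m 0 _ (Nat.zero_le _) h2)

theorem core_eq (word dic : String) :
    (if ((PySem.List.pyRange 1 (word.toList.length + 1) 1).map (fun k => pvCombos word.toList k.toNat)).foldl
       (fun acc words => words.foldl (fun acc w =>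
         let p := String.ofList w
         if ((PySem.Str.split? dic ",").getD []).contains p then (if p.toList.length > acc then p.toList.length else acc) else acc) acc) 0 > 0
     then (word.toList.length : Int) - ((((PySem.List.pyRange 1 (word.toList.length + 1) 1).map (fun k => pvCombos word.toList k.toNat)).foldl
       (fun acc words => words.foldl (fun acc w =>
         let p := String.ofList w
         if ((PySem.Str.split? dic ",").getD []).contains p then (if p.toList.length > acc then p.toList.length else acc) else acc) acc) (0 : Nat) : Nat) : Int)
     else (-1 : Int))
    = (if ((PySem.Str.split? dic ",").getD []).foldl (fun best w =>
         if w.toList.length > best && pvIsSubseq w.toList word.toList then w.toList.length else best) 0 ≠ 0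
       then (word.toList.length : Int) - ((((PySem.Str.split? dic ",").getD []).foldl (fun best w =>
         if w.toList.length > best && pvIsSubseq w.toList word.toList then w.toList.length else best) (0 : Nat) : Nat) : Int)
       else (-1 : Int)) := by
  set chars := word.toList with hchars
  set dw := (PySem.Str.split? dic ",").getD [] with hdw
  have hA : ((PySem.List.pyRange 1 (chars.length + 1) 1).map (fun k => pvCombos chars k.toNat)).foldl
       (fun acc words => words.foldl (fun acc w =>
         let p := String.ofList w
         if dw.contains p then (if p.toList.length > acc then p.toList.length else acc) else acc) acc) 0
      = ((PySem.List.pyRange 1 (chars.length + 1) 1).flatMap (fun k => pvCombos chars k.toNat)).foldl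
          (fun acc w => max acc (if dw.contains (String.ofList w) then w.length else 0)) 0 := by
    rw [nested_foldl]
    apply foldl_ext
    intro acc w
    simp only [String.toList_ofList]
    split_ifs <;> omega
  have hB : dw.foldl (fun best w =>
        if w.toList.length > best && pvIsSubseq w.toList chars then w.toList.length else best) 0
      = dw.foldl (fun a w => max a (if pvIsSubseq w.toList chars then w.toList.length else 0)) 0 := by
    apply foldl_ext
    intro acc w
    cases hs : pvIsSubseq w.toList chars
    · simp
    · simp only [Bool.and_true, decide_eq_true_eq, if_true]
      split_ifs <;> omega
  have key : ((PySem.List.pyRange 1 (chars.length + 1) 1).flatMap (fun k => pvCombos chars k.toNat)).foldl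
          (fun acc w => max acc (if dw.contains (String.ofList w) then w.length else 0)) 0
      = dw.foldl (fun a w => max a (if pvIsSubseq w.toList chars then w.toList.length else 0)) 0 := by
    apply fmax_eq
    · intro w hw
      by_cases hc : dw.contains (String.ofList w)
      · obtain ⟨k, _, hwk⟩ := List.mem_flatMap.mp hw
        have hsub : w.Sublist chars := ((mem_pvCombos chars k.toNat w).mp hwk).1
        have hmem : String.ofList w ∈ dw := List.contains_iff_mem.mp hc
        have hle := le_fmax_of_mem (fun w => if pvIsSubseq w.toList chars then w.toList.length else 0)
          dw 0 (String.ofList w) hmem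
        simp only [String.toList_ofList, (pvIsSubseq_iff chars w).mpr hsub, if_true] at hle
        rw [if_pos hc]
        exact hle
      · rw [if_neg hc]; exact Nat.zero_le _
    · intro v hv
      by_cases hs : pvIsSubseq v.toList chars
      · rcases Nat.eq_zero_or_pos v.toList.length with h0 | h0
      
        · rw [if_pos hs, h0]; exact Nat.zero_le _
        · have hsub : v.toList.Sublist chars := (pvIsSubseq_iff chars v.toList).mp hs
          have hk2 : v.toList.length ≤ chars.length := hsub.length_le
          have hmemw : v.toList ∈ (PySem.List.pyRange 1 (chars.length + 1) 1).flatMap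
              (fun k => pvCombos chars k.toNat) := by
            refine List.mem_flatMap.mpr ⟨(v.toList.length : Int), ?_, ?_⟩
            · exact PySem.List.mem_pyRange_one.mpr ⟨by exact_mod_cast h0, by omega⟩
            · rw [Int.toNat_natCast]
              exact (mem_pvCombos chars v.toList.length v.toList).mpr ⟨hsub, rfl⟩
          have hle := le_fmax_of_mem
            (fun w => if dw.contains (String.ofList w) then w.length else 0) _ 0 v.toList hmemw
          simp only [String.ofList_toList, List.contains_iff_mem.mpr hv, if_true] at hle
          rw [if_pos hs]
          exact hle
      · rw [if_neg hs]; exact Nat.zero_le _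
  rw [hA, hB, key]
  split_ifs with h1 h2 h2 <;> first | rfl | omega

-- ===== VERDICT (by name: the statement is the Claim_ definition above) =====
theorem CharacterRemoval_spec : Claim_equal_CharacterRemoval := by
  intro strArr _ _
  show CharacterRemoval strArr = CharacterRemoval_alt strArr
  unfold CharacterRemoval CharacterRemoval_alt
  exact core_eq ((PySem.List.pyGet? strArr 0).getD "") ((PySem.List.pyGet? strArr 1).getD "")
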